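-- pv_equiv track=rewrite | github.com/AIMLDev726/OrionAI | orionai/cli/chat.py | _try_fix_syntax_errors
-- ===== SOURCE A (Python) =====
-- from typing import  Optional, Tuple, List
--
-- def _try_fix_syntax_errors(code: str) -> Optional[str]:
--     """Try to fix common syntax errors in code."""
--     try:
--         lines = code.split('\n')
--         fixed_lines = []
--
--         for i, line in enumerate(lines):
--             # Skip empty lines
--             if not line.strip():
--                 if fixed_lines:  # Only add empty lines if not at start
--                     fixed_lines.append('')
--                 continue
--
--             # Fix common indentation issues
--             if line.strip().endswith(':'):
--                 # This is a statement that requires indentation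
--                 fixed_lines.append(line)
--                 # Check if next line is properly indented
--                 if i + 1 < len(lines):
--                     next_line = lines[i + 1]
--                     if next_line.strip() and not next_line.startswith('    '):
--                         # Next line should be indented but isn't
--                         continue  # Skip this problematic structure
--             else:
--                 fixed_lines.append(line)
--
--         if fixed_lines:
--             return '\n'.join(fixed_lines)
--     except Exception:
--         pass
--
--     return None
-- ===== SOURCE B (Python) =====
-- def _try_fix_syntax_errors(code):
--     """Try to fix common syntax errors in code."""
--     lines = code.split('\n')
--     start = next((i for i, l in enumerate(lines) if l.strip()), None)
--     if start is None:
--         return None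
--     return '\n'.join('' if not line.strip() else line for line in lines[start:])
-- ===== Notes on version B (the rewrite author's own statement) =====
-- stated objective: simpler
-- what changed: B replaces A's stateful accumulator loop (with its dead ':'-lookahead branch) by find-first-non-blank-index then a single map over the tail that blanks whitespace-only lines.
import Mathlib
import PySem

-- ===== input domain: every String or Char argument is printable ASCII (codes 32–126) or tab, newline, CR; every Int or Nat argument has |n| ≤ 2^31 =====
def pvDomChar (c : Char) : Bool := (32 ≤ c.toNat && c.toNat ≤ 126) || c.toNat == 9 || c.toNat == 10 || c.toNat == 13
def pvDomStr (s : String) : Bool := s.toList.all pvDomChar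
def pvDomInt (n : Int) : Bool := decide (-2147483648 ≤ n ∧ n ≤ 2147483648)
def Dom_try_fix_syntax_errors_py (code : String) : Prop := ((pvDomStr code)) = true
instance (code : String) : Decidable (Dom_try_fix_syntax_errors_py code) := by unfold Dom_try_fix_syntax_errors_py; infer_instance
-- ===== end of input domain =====

-- B drops the observably inert ':'-lookahead branch and replaces A's stateful accumulator loop
-- by find-first-non-blank-index then one map over the tail; same return value (objective: simpler).

-- ===== PORT A =====
-- A's loop body, verbatim (including the inert ':' lookahead; Python's 'continue' there
-- just moves to the next iteration, same as falling through, so both arms keep acc')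
def pvStepA (lines : List String) (acc : List String) (p : Int × String) : List String :=
  if PySem.Str.strip p.2 = "" then
    if acc ≠ [] then acc ++ [""] else acc     -- only add empty lines if not at start
  else if PySem.Str.endswith (PySem.Str.strip p.2) ":" then
    let acc' := acc ++ [p.2]
    if p.1 + 1 < (lines.length : Int) then
      match PySem.List.pyGet? lines (p.1 + 1) with   -- lines[i+1]; the guard makes it in range
      | some next_line =>
        if PySem.Str.strip next_line ≠ "" ∧ ¬ (PySem.Str.startswith next_line "    " = true)
        then acc' else acc'
      | none => acc'
    else acc'
  else acc ++ [p.2]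

-- code.split('\n'): sep ≠ "" so split? is always `some`; getD only unwraps it
def try_fix_syntax_errors_py (code : String) : Option String :=
  let lines := (PySem.Str.split? code "\n").getD []
  let fixed_lines := (PySem.List.enumerate lines 0).foldl (pvStepA lines) []
  if fixed_lines ≠ [] then some (PySem.Str.join "\n" fixed_lines) else none

-- ===== PORT B =====
def try_fix_syntax_errors_py_alt (code : String) : Option String :=
  let lines := (PySem.Str.split? code "\n").getD []
  match lines.findIdx? (fun l => !(PySem.Str.strip l == "")) with
  | none => none
  | some i => some (PySem.Str.join "\n"
      ((lines.drop i).map (fun l => if PySem.Str.strip l = "" then "" else l)))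

-- ===== PRECONDITION & SPEC =====
def Spec_try_fix_syntax_errors_py (code : String) (out : Option String) : Prop := out = try_fix_syntax_errors_py_alt code
instance (code : String) (out : Option String) : Decidable (Spec_try_fix_syntax_errors_py code out) := by unfold Spec_try_fix_syntax_errors_py; infer_instance

-- ===== CLAIM (what is proved, stated in full; the proofs are below) =====
def Claim_equal_try_fix_syntax_errors_py : Prop := ∀ (code : String), Dom_try_fix_syntax_errors_py code → Spec_try_fix_syntax_errors_py code (try_fix_syntax_errors_py code)

-- ===== LEMMAS AND PROOFS =====

-- the per-line normalisation both programs effect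
def pvBlank (l : String) : String := if PySem.Str.strip l = "" then "" else l

theorem pvStepA_of_ne (lines acc : List String) (p : Int × String) (h : acc ≠ []) :
    pvStepA lines acc p = acc ++ [pvBlank p.2] := by
  unfold pvStepA pvBlank
  by_cases hb : PySem.Str.strip p.2 = "" <;> simp [hb, h] <;>
    try (intros; first | rfl | (split <;> rfl))

theorem pvStepA_nil_blank (lines : List String) (i : Int) (l : String)
    (hb : PySem.Str.strip l = "") : pvStepA lines [] (i, l) = [] := by
  simp [pvStepA, hb]

theorem pvStepA_nil_nonblank (lines : List String) (i : Int) (l : String)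
    (hb : ¬ PySem.Str.strip l = "") : pvStepA lines [] (i, l) = [l] := by
  simp [pvStepA, hb] <;> try (intros; first | rfl | (split <;> rfl))

theorem pvLoop_ne (lines : List String) (ls : List String) (i : Int) (acc : List String)
    (h : acc ≠ []) :
    (PySem.List.enumerate ls i).foldl (pvStepA lines) acc = acc ++ ls.map pvBlank := by
  induction ls generalizing i acc with
  | nil => simp [PySem.List.enumerate_nil]
  | cons l t ih =>
    rw [PySem.List.enumerate_cons]
    simp only [List.foldl_cons]
    rw [pvStepA_of_ne lines acc _ h, ih (i+1) _ (by simp)]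
    simp

theorem pvLoop_nil (lines : List String) (ls : List String) (i : Int) :
    (PySem.List.enumerate ls i).foldl (pvStepA lines) [] =
      (match ls.findIdx? (fun l => !(PySem.Str.strip l == "")) with
       | none => []
       | some k => (ls.drop k).map pvBlank) := by
  induction ls generalizing i with
  | nil => simp [PySem.List.enumerate_nil]
  | cons l t ih =>
    rw [PySem.List.enumerate_cons]
    simp only [List.foldl_cons]
    by_cases hb : PySem.Str.strip l = ""
    · rw [pvStepA_nil_blank lines i l hb, ih (i+1), List.findIdx?_cons]
      simp only [hb]
      simp
      cases t.findIdx? (fun l => !(PySem.Str.strip l == "")) <;> simp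
    · rw [pvStepA_nil_nonblank lines i l hb,
        pvLoop_ne lines t (i+1) [l] (by simp), List.findIdx?_cons]
      simp [hb, pvBlank]

-- ===== VERDICT (by name: the statement is the Claim_ definition above) =====
theorem try_fix_syntax_errors_py_spec : Claim_equal_try_fix_syntax_errors_py := by
  intro code _
  unfold Spec_try_fix_syntax_errors_py try_fix_syntax_errors_py try_fix_syntax_errors_py_alt
  set lines := (PySem.Str.split? code "\n").getD [] with hl
  show (if (PySem.List.enumerate lines 0).foldl (pvStepA lines) [] ≠ [] then
      some (PySem.Str.join "\n" ((PySem.List.enumerate lines 0).foldl (pvStepA lines) []))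
    else none) =
    (match lines.findIdx? (fun l => !(PySem.Str.strip l == "")) with
     | none => none
     | some i => some (PySem.Str.join "\n"
         ((lines.drop i).map (fun l => if PySem.Str.strip l = "" then "" else l))))
  rw [pvLoop_nil lines lines 0]
  cases hf : lines.findIdx? (fun l => !(PySem.Str.strip l == "")) with
  | none => simp
  | some k =>
    have hk : k < lines.length := by
      have := List.findIdx?_eq_some_iff_findIdx_eq.mp hf
      omega
    have hne : (lines.drop k).map pvBlank ≠ [] := by
      simp [List.drop_eq_nil_iff]; omega
    rw [if_pos hne]
    rfl
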